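-- pv_equiv track=rewrite | github.com/abbasmoosajee07/AlgoVault | Codyssi/2025/07/CodyssiDay07.py | swap_tracks_func
-- ===== SOURCE A (Python) =====
-- def swap_tracks_func(freq_dict: dict, swaps: tuple) -> dict:
--     track_x, track_y = swaps
--     swap_freq = freq_dict.copy()
--
--     # Convert to list of track numbers (assuming 1-based and consecutive)
--     track_nums = list(freq_dict.keys())
--     n = len(track_nums)
--
--     # Ensure X and Y are valid tracks
--     if track_x not in freq_dict or track_y not in freq_dict:
--         return swap_freq
--
--     # Index positions (0-based) for X and Y in the sorted track list
--     ix = track_nums.index(track_x)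
--     iy = track_nums.index(track_y)
--
--     # Find the maximum block size
--     max_block = 0
--     while (ix + max_block < n and iy + max_block < n and
--             track_nums[ix + max_block] == track_nums[ix] + max_block and
--             track_nums[iy + max_block] == track_nums[iy] + max_block and
--             abs((track_nums[ix + max_block]) - (track_nums[iy + max_block])) >= max_block + 1):
--         max_block += 1
--
--     # Perform the block-wise swap
--     for i in range(max_block):
--         tx = track_nums[ix + i]
--         ty = track_nums[iy + i]
--         swap_freq[tx], swap_freq[ty] = swap_freq[ty], swap_freq[tx]
--
--     return swap_freq
-- ===== SOURCE B (Python) =====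
-- def swap_tracks_func(freq_dict: dict, swaps: tuple) -> dict:
--     track_x, track_y = swaps
--     out = freq_dict.copy()
--
--     if track_x not in freq_dict or track_y not in freq_dict:
--         return out
--
--     keys = list(freq_dict.keys())
--     ix = keys.index(track_x)
--     iy = keys.index(track_y)
--
--     # Length of the maximal consecutive ascending run of keys starting at
--     # position i (keys[i], keys[i]+1, keys[i]+2, ...).
--     def run(i):
--         v = keys[i]
--         r = 0
--         for x in keys[i:]:
--             if x != v + r:
--                 break
--             r += 1
--         return r
--
--     # While both runs continue, keys[ix+m]-keys[iy+m] stays equal to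
--     # track_x-track_y, so the overlap bound is simply abs(track_x-track_y).
--     block = min(run(ix), run(iy), abs(track_x - track_y))
--
--     for a, b in zip(keys[ix:ix + block], keys[iy:iy + block]):
--         out[a], out[b] = out[b], out[a]
--     return out
-- ===== Notes on version B (the rewrite author's own statement) =====
-- stated objective: alternative
-- what changed: A's while-loop that re-checks a five-part predicate per step and its separate apply loop are replaced by two independent consecutive-run scans, a closed-form block size min(run(ix), run(iy), abs(x-y)) (the |x-y| bound is constant along the runs), and a swap over zipped key slices.
import Mathlib
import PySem

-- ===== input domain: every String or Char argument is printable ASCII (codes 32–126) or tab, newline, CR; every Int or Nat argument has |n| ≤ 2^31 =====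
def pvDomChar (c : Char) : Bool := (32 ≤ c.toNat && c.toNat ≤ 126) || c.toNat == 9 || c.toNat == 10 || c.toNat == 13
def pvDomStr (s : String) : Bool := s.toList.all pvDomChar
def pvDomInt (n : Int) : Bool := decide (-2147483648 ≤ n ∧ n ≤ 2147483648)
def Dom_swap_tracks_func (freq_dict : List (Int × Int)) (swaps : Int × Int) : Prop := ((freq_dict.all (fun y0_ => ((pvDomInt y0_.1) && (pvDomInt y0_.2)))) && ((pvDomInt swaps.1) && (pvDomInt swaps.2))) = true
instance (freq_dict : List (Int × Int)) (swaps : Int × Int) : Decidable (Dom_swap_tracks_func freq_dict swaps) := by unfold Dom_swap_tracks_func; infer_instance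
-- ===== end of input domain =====

-- B replaces A's count-then-apply pair of loops (a while-loop finding max_block, then an
-- index loop swapping) by two independent consecutive-run scans, a closed-form min for the
-- block size (the |x-y| bound is constant along the runs), and a swap over zipped key slices
-- (objective: simpler/alternative, same cost).

-- ===== PORT A =====
-- while-loop with fuel; the fuel n+1 is exact: the predicate forces m < n, so at most n
-- iterations of A's while loop can run before it stops
def pvWhileCount (P : Nat → Bool) : Nat → Nat → Nat
  | 0, m => m
  | f + 1, m => if P m then pvWhileCount P f (m + 1) else m

-- the condition of A's while loop; list indexing as getD is exact: the indices are guarded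
-- in range by the first two (short-circuited) conjuncts
def pvSwapPred (ks : List Int) (n ix iy : Nat) (m : Nat) : Bool :=
  decide (ix + m < n) && decide (iy + m < n) &&
  (ks.getD (ix + m) 0 == ks.getD ix 0 + (m : Int)) &&
  (ks.getD (iy + m) 0 == ks.getD iy 0 + (m : Int)) &&
  decide ((m : Int) + 1 ≤ ((ks.getD (ix + m) 0 - ks.getD (iy + m) 0).natAbs : Int))

def swap_tracks_func (freq_dict : List (Int × Int)) (swaps : Int × Int) : List (Int × Int) :=
  let track_x := swaps.1
  let track_y := swaps.2
  let fd : PySem.Dict Int Int := PySem.Dict.mk freq_dict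
  let swap_freq := fd                                   -- freq_dict.copy()
  let track_nums := fd.keys
  let n := track_nums.length
  if !(fd.contains track_x) || !(fd.contains track_y) then
    swap_freq.items
  else
    -- membership was checked above, so .index never raises: index? is some, getD 0 unused
    let ix := (PySem.List.index? track_nums track_x).getD 0
    let iy := (PySem.List.index? track_nums track_y).getD 0
    let max_block := pvWhileCount (pvSwapPred track_nums n ix iy) (n + 1) 0
    -- swap loop; tx/ty are keys of the dict, so getD 0 is exact (never defaults)
    let out := (List.range max_block).foldl
      (fun d i =>
        let tx := track_nums.getD (ix + i) 0
        let ty := track_nums.getD (iy + i) 0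
        (d.insert tx (d.getD ty 0)).insert ty (d.getD tx 0)) swap_freq
    out.items

-- ===== PORT B =====
-- Source B's run(i): fold over keys[i:] counting the consecutive ascending prefix, break on mismatch
def pvRunAux (v : Int) (r : Nat) : List Int → Nat
  | [] => r
  | x :: xs => if x == v + (r : Int) then pvRunAux v (r + 1) xs else r

def swap_tracks_func_alt (freq_dict : List (Int × Int)) (swaps : Int × Int) : List (Int × Int) :=
  let track_x := swaps.1
  let track_y := swaps.2
  let fd : PySem.Dict Int Int := PySem.Dict.mk freq_dict
  let out := fd                                         -- freq_dict.copy()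
  if !(fd.contains track_x) || !(fd.contains track_y) then
    out.items
  else
    let keys := fd.keys
    -- membership was checked above, so .index never raises and keys[ix]/keys[iy] exist
    let ix := (PySem.List.index? keys track_x).getD 0
    let iy := (PySem.List.index? keys track_y).getD 0
    let block := min (min (pvRunAux (keys.getD ix 0) 0 (PySem.List.slice keys (some (ix : Int)) none))
                          (pvRunAux (keys.getD iy 0) 0 (PySem.List.slice keys (some (iy : Int)) none)))
                     (track_x - track_y).natAbs
    let pairs := List.zip (PySem.List.slice keys (some (ix : Int)) (some ((ix : Int) + (block : Int))))
                          (PySem.List.slice keys (some (iy : Int)) (some ((iy : Int) + (block : Int))))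
    (pairs.foldl (fun d p => (d.insert p.1 (d.getD p.2 0)).insert p.2 (d.getD p.1 0)) out).items

-- ===== PRECONDITION & SPEC =====
def Spec_swap_tracks_func (freq_dict : List (Int × Int)) (swaps : Int × Int) (out : List (Int × Int)) : Prop := out = swap_tracks_func_alt freq_dict swaps
instance (freq_dict : List (Int × Int)) (swaps : Int × Int) (out : List (Int × Int)) : Decidable (Spec_swap_tracks_func freq_dict swaps out) := by unfold Spec_swap_tracks_func; infer_instance

-- ===== CLAIM (what is proved, stated in full; the proofs are below) =====
def Claim_equal_swap_tracks_func : Prop := ∀ (freq_dict : List (Int × Int)) (swaps : Int × Int), Dom_swap_tracks_func freq_dict swaps → Spec_swap_tracks_func freq_dict swaps (swap_tracks_func freq_dict swaps)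

-- ===== LEMMAS AND PROOFS =====

-- the while counter stops at K if the predicate is true below K and false at K
theorem pvWhileCount_spec (P : Nat → Bool) (f m K : Nat) (h1 : m ≤ K) (h2 : K ≤ m + f)
    (ht : ∀ j, m ≤ j → j < K → P j = true) (hf : P K = false) :
    pvWhileCount P f m = K := by
  induction f generalizing m with
  | zero => simp only [pvWhileCount]; omega
  | succ f ih =>
    by_cases hm : m = K
    · subst hm; simp [pvWhileCount, hf]
    · have hlt : m < K := lt_of_le_of_ne h1 hm
      simp only [pvWhileCount, ht m le_rfl hlt, if_true]
      exact ih (m + 1) hlt (by omega) (fun j hj hjK => ht j (by omega) hjK)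

theorem pvRunAux_le (v : Int) (l : List Int) (r : Nat) : pvRunAux v r l ≤ r + l.length := by
  induction l generalizing r with
  | nil => simp [pvRunAux]
  | cons x xs ih =>
    simp only [pvRunAux, List.length_cons]
    split
    · have := ih (r + 1); omega
    · omega

theorem pvRunAux_below (v : Int) (l : List Int) (r j : Nat) (h1 : r ≤ j)
    (h2 : j < pvRunAux v r l) : j - r < l.length ∧ l.getD (j - r) 0 = v + (j : Int) := by
  induction l generalizing r j with
  | nil => simp only [pvRunAux] at h2; omega
  | cons x xs ih =>
    simp only [pvRunAux] at h2
    split at h2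
    · rename_i hx
      by_cases hj : j = r
      · subst hj
        refine ⟨by simp, ?_⟩
        simpa using (beq_iff_eq.mp hx)
      · have h1' : r + 1 ≤ j := by omega
        obtain ⟨hl, he⟩ := ih (r + 1) j h1' h2
        have hjr : j - r = (j - (r + 1)) + 1 := by omega
        rw [hjr]
        exact ⟨by simpa using Nat.succ_lt_succ hl, by simpa using he⟩
    · omega

theorem pvRunAux_ge (v : Int) (l : List Int) (r : Nat) : r ≤ pvRunAux v r l := by
  induction l generalizing r with
  | nil => simp [pvRunAux]
  | cons x xs ih =>
    simp only [pvRunAux]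
    split
    · have := ih (r + 1); omega
    · omega

theorem pvRunAux_stop (v : Int) (l : List Int) (r : Nat)
    (h : pvRunAux v r l - r < l.length) :
    l.getD (pvRunAux v r l - r) 0 ≠ v + (pvRunAux v r l : Int) := by
  induction l generalizing r with
  | nil => simp at h
  | cons x xs ih =>
    by_cases hx : (x == v + (r : Int)) = true
    · simp only [pvRunAux, hx, if_true] at h ⊢
      have hge := pvRunAux_ge v xs (r + 1)
      have hjr : pvRunAux v (r + 1) xs - r = (pvRunAux v (r + 1) xs - (r + 1)) + 1 := by omega
      rw [hjr]
      simp only [List.getD_cons_succ]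
      exact ih (r + 1) (by simp only [List.length_cons] at h; omega)
    · simp only [Bool.not_eq_true] at hx
      simp only [pvRunAux, hx, Bool.false_eq_true, if_false, Nat.sub_self, List.getD_cons_zero]
      intro hc
      rw [hc] at hx
      simp at hx

-- getD through drop
theorem pvGetD_drop (ks : List Int) (i j : Nat) :
    (ks.drop i).getD j 0 = ks.getD (i + j) 0 := by
  simp [List.getD_eq_getElem?_getD, List.getElem?_drop]

-- positions below the run length are in range and consecutive
theorem run_below (ks : List Int) (i j : Nat)
    (h : j < pvRunAux (ks.getD i 0) 0 (ks.drop i)) :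
    i + j < ks.length ∧ ks.getD (i + j) 0 = ks.getD i 0 + (j : Int) := by
  obtain ⟨hl, he⟩ := pvRunAux_below (ks.getD i 0) (ks.drop i) 0 j (Nat.zero_le j) h
  simp only [Nat.sub_zero, List.length_drop] at hl he
  rw [pvGetD_drop] at he
  exact ⟨by omega, he⟩

-- the run stops: at its end the in-range-and-consecutive condition fails
theorem run_stop (ks : List Int) (i : Nat) :
    ¬ (i + pvRunAux (ks.getD i 0) 0 (ks.drop i) < ks.length ∧
       ks.getD (i + pvRunAux (ks.getD i 0) 0 (ks.drop i)) 0
         = ks.getD i 0 + (pvRunAux (ks.getD i 0) 0 (ks.drop i) : Int)) := by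
  rintro ⟨hlt, heq⟩
  set R := pvRunAux (ks.getD i 0) 0 (ks.drop i) with hR
  have hlen : R - 0 < (ks.drop i).length := by simp only [List.length_drop]; omega
  have := pvRunAux_stop (ks.getD i 0) (ks.drop i) 0 hlen
  simp only [Nat.sub_zero, pvGetD_drop] at this
  exact this heq

-- A's while-loop bound equals B's closed-form min of the two run lengths and |kx - ky|
theorem block_eq (ks : List Int) (ix iy : Nat) :
    pvWhileCount (pvSwapPred ks ks.length ix iy) (ks.length + 1) 0
      = min (min (pvRunAux (ks.getD ix 0) 0 (ks.drop ix)) (pvRunAux (ks.getD iy 0) 0 (ks.drop iy)))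
            ((ks.getD ix 0 - ks.getD iy 0).natAbs) := by
  set rx := pvRunAux (ks.getD ix 0) 0 (ks.drop ix) with hrx
  set ry := pvRunAux (ks.getD iy 0) 0 (ks.drop iy) with hry
  set dA := (ks.getD ix 0 - ks.getD iy 0).natAbs with hdA
  have hrxle : rx ≤ ks.length := by
    have := pvRunAux_le (ks.getD ix 0) (ks.drop ix) 0
    simp only [List.length_drop] at this; omega
  apply pvWhileCount_spec
  · exact Nat.zero_le _
  · omega
  · intro j _ hj
    have hjx : j < rx := by omega
    have hjy : j < ry := by omega
    have hjd : j < dA := by omega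
    obtain ⟨hx1, hx2⟩ := run_below ks ix j hjx
    obtain ⟨hy1, hy2⟩ := run_below ks iy j hjy
    simp only [pvSwapPred, Bool.and_eq_true, decide_eq_true_eq, beq_iff_eq]
    refine ⟨⟨⟨⟨hx1, hy1⟩, hx2⟩, hy2⟩, ?_⟩
    rw [hx2, hy2]
    have : (ks.getD ix 0 + (j : Int)) - (ks.getD iy 0 + (j : Int)) = ks.getD ix 0 - ks.getD iy 0 := by ring
    rw [this, ← hdA]
    omega
  · rw [Bool.eq_false_iff]
    intro h
    simp only [pvSwapPred, Bool.and_eq_true, decide_eq_true_eq, beq_iff_eq] at h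
    obtain ⟨⟨⟨⟨hx1, hy1⟩, hx2⟩, hy2⟩, hab⟩ := h
    set K := min (min rx ry) dA with hK
    have hKx : K < rx := by
      by_contra h'
      have hKrx : K = rx := by omega
      rw [hKrx] at hx1 hx2
      exact run_stop ks ix ⟨hx1, hx2⟩
    have hKy : K < ry := by
      by_contra h'
      have hKry : K = ry := by omega
      rw [hKry] at hy1 hy2
      exact run_stop ks iy ⟨hy1, hy2⟩
    have hKd : K = dA := by omega
    rw [hx2, hy2] at hab
    have : (ks.getD ix 0 + (K : Int)) - (ks.getD iy 0 + (K : Int)) = ks.getD ix 0 - ks.getD iy 0 := by ring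
    rw [this, ← hdA] at hab
    omega

-- the zip of the two key slices is the list of index pairs A's swap loop walks
theorem zip_slices (ks : List Int) (ix iy K : Nat)
    (hx : ∀ j, j < K → ix + j < ks.length) (hy : ∀ j, j < K → iy + j < ks.length) :
    List.zip ((ks.drop ix).take K) ((ks.drop iy).take K)
      = (List.range K).map (fun i => (ks.getD (ix + i) 0, ks.getD (iy + i) 0)) := by
  have hKx : K ≤ ks.length - ix := by
    rcases Nat.eq_zero_or_pos K with h | h
    · omega
    · have := hx (K - 1) (by omega); omega
  have hKy : K ≤ ks.length - iy := by
    rcases Nat.eq_zero_or_pos K with h | h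
    · omega
    · have := hy (K - 1) (by omega); omega
  apply List.ext_getElem
  · simp; omega
  · intro n h1 h2
    have hn : n < K := by simpa using h2
    have hnx := hx n hn
    have hny := hy n hn
    simp only [List.getElem_zip, List.getElem_take, List.getElem_drop, List.getElem_map,
      List.getElem_range]
    rw [List.getD_eq_getElem ks 0 (by omega), List.getD_eq_getElem ks 0 (by omega)]

-- ===== VERDICT (by name: the statement is the Claim_ definition above) =====
theorem swap_tracks_func_spec : Claim_equal_swap_tracks_func := by
  intro freq_dict swaps _
  unfold Spec_swap_tracks_func
  simp only [swap_tracks_func, swap_tracks_func_alt]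
  set tx := swaps.1
  set ty := swaps.2
  set fd : PySem.Dict Int Int := PySem.Dict.mk freq_dict with hfd
  by_cases hg : (!(fd.contains tx) || !(fd.contains ty)) = true
  · rw [if_pos hg, if_pos hg]
  · rw [if_neg hg, if_neg hg]
    simp only [Bool.or_eq_true, Bool.not_eq_true', not_or, Bool.not_eq_false] at hg
    obtain ⟨hcx, hcy⟩ := hg
    set ks := fd.keys with hks
    have hmx : tx ∈ ks := (PySem.Dict.contains_iff_mem_keys fd tx).mp hcx
    have hmy : ty ∈ ks := (PySem.Dict.contains_iff_mem_keys fd ty).mp hcy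
    obtain ⟨ix, hix⟩ := Option.isSome_iff_exists.mp ((PySem.List.index?_isSome_iff ks tx).mpr hmx)
    obtain ⟨iy, hiy⟩ := Option.isSome_iff_exists.mp ((PySem.List.index?_isSome_iff ks ty).mpr hmy)
    obtain ⟨hixl, hixv, -⟩ := PySem.List.getElem_of_index?_eq_some hix
    obtain ⟨hiyl, hiyv, -⟩ := PySem.List.getElem_of_index?_eq_some hiy
    rw [hix, hiy]
    simp only [Option.getD_some]
    have hgx : ks.getD ix 0 = tx := by rw [List.getD_eq_getElem ks 0 hixl, hixv]
    have hgy : ks.getD iy 0 = ty := by rw [List.getD_eq_getElem ks 0 hiyl, hiyv]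
    -- B's slices keys[i:] are drops
    rw [PySem.List.slice_from_natCast, PySem.List.slice_from_natCast]
    set rx := pvRunAux (ks.getD ix 0) 0 (ks.drop ix) with hrx
    set ry := pvRunAux (ks.getD iy 0) 0 (ks.drop iy) with hry
    set K := min (min rx ry) ((tx - ty).natAbs) with hK
    have hKd : (tx - ty).natAbs = (ks.getD ix 0 - ks.getD iy 0).natAbs := by rw [hgx, hgy]
    have hmb : pvWhileCount (pvSwapPred ks ks.length ix iy) (ks.length + 1) 0 = K := by
      rw [block_eq ks ix iy, hK, hKd]
    rw [hmb]
    have hbx : ∀ j, j < K → ix + j < ks.length := by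
      intro j hj; exact (run_below ks ix j (by omega)).1
    have hby : ∀ j, j < K → iy + j < ks.length := by
      intro j hj; exact (run_below ks iy j (by omega)).1
    rw [PySem.List.slice_natCast_add, PySem.List.slice_natCast_add,
        zip_slices ks ix iy K hbx hby, List.foldl_map]
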